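-- pv_equiv track=rewrite | github.com/cymerrad/aoc | 2020/16.py | annotate_nearby_tickets
-- ===== SOURCE A (Python) =====
-- from collections import defaultdict
--
-- def annotate_nearby_tickets(rules, yours, nearby):
--     possibilities_for_value = defaultdict(set)
--     for rule in rules:
--         [name, r1, r2] = rule
--         for r in [r1, r2]:
--             lo, hi = r
--             for v in range(lo, hi + 1):
--                 possibilities_for_value[v].add(name)
--
--     annotated_tickets = []
--     for ticket in nearby:
--         notes = [possibilities_for_value.get(value, None) for value in ticket]
--         annotated_tickets.append(tuple([tuple(ticket), tuple(notes)]))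
--
--     return annotated_tickets
-- ===== SOURCE B (Python) =====
-- def annotate_nearby_tickets(rules, yours, nearby):
--     def note_for(v):
--         names = [name for name, (a1, b1), (a2, b2) in rules
--                  if a1 <= v <= b1 or a2 <= v <= b2]
--         return set(names) if names else None
--     memo = {}
--     for t in nearby:
--         for v in t:
--             if v not in memo:
--                 memo[v] = note_for(v)
--     return [(tuple(t), tuple(memo[v] for v in t)) for t in nearby]
-- ===== Notes on version B (the rewrite author's own statement) =====
-- stated objective: alternative
-- what changed: Instead of materialising a dict entry for every integer in every rule's ranges, B tests each distinct ticket value once against the rules' interval bounds (memoised per value), so no range is ever enumerated.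
import Mathlib
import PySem

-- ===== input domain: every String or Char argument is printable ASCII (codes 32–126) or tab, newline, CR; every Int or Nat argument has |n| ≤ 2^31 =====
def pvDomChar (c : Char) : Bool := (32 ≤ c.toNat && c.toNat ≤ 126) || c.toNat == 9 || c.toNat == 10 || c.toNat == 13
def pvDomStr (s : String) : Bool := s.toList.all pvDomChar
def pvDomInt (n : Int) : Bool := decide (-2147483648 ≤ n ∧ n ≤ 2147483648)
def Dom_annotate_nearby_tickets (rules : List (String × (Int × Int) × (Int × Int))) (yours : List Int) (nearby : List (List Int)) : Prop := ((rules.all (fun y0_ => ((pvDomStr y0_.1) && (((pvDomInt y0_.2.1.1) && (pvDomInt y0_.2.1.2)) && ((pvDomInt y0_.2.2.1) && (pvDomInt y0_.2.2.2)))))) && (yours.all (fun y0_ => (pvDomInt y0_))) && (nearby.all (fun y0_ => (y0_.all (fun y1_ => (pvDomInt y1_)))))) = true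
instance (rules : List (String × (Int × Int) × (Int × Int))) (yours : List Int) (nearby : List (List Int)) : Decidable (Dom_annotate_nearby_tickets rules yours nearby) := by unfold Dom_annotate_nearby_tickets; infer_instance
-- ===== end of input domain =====

-- ===== PORT A =====
-- B computes each distinct ticket value's matching rule names by interval tests (memoised per
-- value) instead of enumerating every integer of every range into a dict; objective: alternative.

-- body of A's outer loop (one rule folded into the defaultdict), named so the proofs can cite it
def pvRuleStep (d : PySem.Dict Int (List String)) (rule : String × (Int × Int) × (Int × Int)) : PySem.Dict Int (List String) :=
  match rule with
  | (name, r1, r2) =>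
    [r1, r2].foldl (fun d r =>
      (PySem.List.pyRange r.1 (r.2 + 1) 1).foldl
        (fun d v => d.modify v [] (fun s => PySem.Set.add s name)) d) d

def annotate_nearby_tickets (rules : List (String × (Int × Int) × (Int × Int))) (yours : List Int) (nearby : List (List Int)) : List (List Int × List (Option (List String))) :=
  let possibilities_for_value : PySem.Dict Int (List String) :=
    rules.foldl pvRuleStep PySem.Dict.empty
  nearby.foldl (fun acc ticket =>
    acc ++ [(ticket, ticket.map (fun value => possibilities_for_value.get? value))]) []

-- ===== PORT B =====
-- B-side helpers: the names of the rules matching a value, and the note B stores for it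
def pvNames (rules : List (String × (Int × Int) × (Int × Int))) (v : Int) : List String :=
  (rules.filter (fun r =>
    (decide (r.2.1.1 ≤ v) && decide (v ≤ r.2.1.2)) || (decide (r.2.2.1 ≤ v) && decide (v ≤ r.2.2.2)))).map (·.1)

def pvNoteFor (rules : List (String × (Int × Int) × (Int × Int))) (v : Int) : Option (List String) :=
  if pvNames rules v = [] then none else some (PySem.Set.ofList (pvNames rules v))

def annotate_nearby_tickets_alt (rules : List (String × (Int × Int) × (Int × Int))) (yours : List Int) (nearby : List (List Int)) : List (List Int × List (Option (List String))) :=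
  let memo : PySem.Dict Int (Option (List String)) :=
    nearby.foldl (fun d t =>
      t.foldl (fun d v => if d.contains v then d else d.insert v (pvNoteFor rules v)) d)
      PySem.Dict.empty
  -- memo[v]: every v of every ticket is a key of memo, so Python's lookup cannot raise;
  -- the `.getD none` branch is unreachable (proved via pvMemoBuild below)
  nearby.map (fun t => (t, t.map (fun v => (memo.get? v).getD none)))

-- ===== PRECONDITION & SPEC =====
def Spec_annotate_nearby_tickets (rules : List (String × (Int × Int) × (Int × Int))) (yours : List Int) (nearby : List (List Int)) (out : List (List Int × List (Option (List String)))) : Prop := out = annotate_nearby_tickets_alt rules yours nearby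
instance (rules : List (String × (Int × Int) × (Int × Int))) (yours : List Int) (nearby : List (List Int)) (out : List (List Int × List (Option (List String)))) : Decidable (Spec_annotate_nearby_tickets rules yours nearby out) := by unfold Spec_annotate_nearby_tickets; infer_instance

-- ===== CLAIM (what is proved, stated in full; the proofs are below) =====
def Claim_equal_annotate_nearby_tickets : Prop := ∀ (rules : List (String × (Int × Int) × (Int × Int))) (yours : List Int) (nearby : List (List Int)), Dom_annotate_nearby_tickets rules yours nearby → Spec_annotate_nearby_tickets rules yours nearby (annotate_nearby_tickets rules yours nearby)

-- ===== LEMMAS AND PROOFS =====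

-- effect of the innermost loop of A (modify over a list of keys) on one lookup
theorem pvFoldModify (L : List Int) (d : PySem.Dict Int (List String)) (v : Int) (name : String) :
    (L.foldl (fun d x => d.modify x [] (fun s => PySem.Set.add s name)) d).get? v =
      if v ∈ L then some (PySem.Set.add (PySem.Dict.getD d v []) name) else d.get? v := by
  induction L generalizing d with
  | nil => simp
  | cons x L ih =>
    simp only [List.foldl_cons, ih]
    by_cases hxv : v = x
    · subst hxv
      have hmod : (d.modify v [] (fun s => PySem.Set.add s name)) =
          d.insert v (PySem.Set.add (PySem.Dict.getD d v []) name) := rfl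
      by_cases hv : v ∈ L <;>
        simp [hv, hmod, PySem.Dict.get?_insert_self, PySem.Dict.getD_insert_self]
    · have hmod : (d.modify x [] (fun s => PySem.Set.add s name)) =
          d.insert x (PySem.Set.add (PySem.Dict.getD d x []) name) := rfl
      by_cases hv : v ∈ L <;>
        simp [hv, hxv, hmod, PySem.Dict.get?_insert_of_ne _ _ hxv,
          PySem.Dict.getD_insert, List.mem_cons]

-- effect of processing one whole rule on one lookup
theorem pvRuleStepGet? (name : String) (r1 r2 : Int × Int) (d : PySem.Dict Int (List String)) (v : Int) :
    (pvRuleStep d (name, r1, r2)).get? v =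
      if (r1.1 ≤ v ∧ v ≤ r1.2) ∨ (r2.1 ≤ v ∧ v ≤ r2.2) then
        some (PySem.Set.add (PySem.Dict.getD d v []) name) else d.get? v := by
  show ((PySem.List.pyRange r2.1 (r2.2 + 1) 1).foldl
      (fun d x => d.modify x [] (fun s => PySem.Set.add s name))
      ((PySem.List.pyRange r1.1 (r1.2 + 1) 1).foldl
        (fun d x => d.modify x [] (fun s => PySem.Set.add s name)) d)).get? v = _
  rw [pvFoldModify, pvFoldModify]
  have h1 : (v ∈ PySem.List.pyRange r1.1 (r1.2 + 1) 1) ↔ (r1.1 ≤ v ∧ v ≤ r1.2) := by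
    rw [PySem.List.mem_pyRange_one]; omega
  have h2 : (v ∈ PySem.List.pyRange r2.1 (r2.2 + 1) 1) ↔ (r2.1 ≤ v ∧ v ≤ r2.2) := by
    rw [PySem.List.mem_pyRange_one]; omega
  by_cases c1 : r1.1 ≤ v ∧ v ≤ r1.2 <;> by_cases c2 : r2.1 ≤ v ∧ v ≤ r2.2 <;>
    simp [h1, h2, c1, c2, PySem.Dict.getD_eq_get?_getD, pvFoldModify]

theorem pvRuleStepGetD (name : String) (r1 r2 : Int × Int) (d : PySem.Dict Int (List String)) (v : Int) :
    PySem.Dict.getD (pvRuleStep d (name, r1, r2)) v [] =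
      if (r1.1 ≤ v ∧ v ≤ r1.2) ∨ (r2.1 ≤ v ∧ v ≤ r2.2) then
        PySem.Set.add (PySem.Dict.getD d v []) name else PySem.Dict.getD d v [] := by
  rw [PySem.Dict.getD_eq_get?_getD, pvRuleStepGet?]
  by_cases hc : (r1.1 ≤ v ∧ v ≤ r1.2) ∨ (r2.1 ≤ v ∧ v ≤ r2.2) <;>
    simp [hc, PySem.Dict.getD_eq_get?_getD]

-- the dict A builds, looked up at v, is B's note computation relative to the start dict
theorem pvDictChar (rules : List (String × (Int × Int) × (Int × Int)))
    (d : PySem.Dict Int (List String)) (v : Int) :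
    (rules.foldl pvRuleStep d).get? v =
      if pvNames rules v = [] then d.get? v
      else some (PySem.Set.update (PySem.Dict.getD d v []) (pvNames rules v)) := by
  induction rules generalizing d with
  | nil => simp [pvNames]
  | cons rule rules ih =>
    obtain ⟨name, r1, r2⟩ := rule
    rw [List.foldl_cons, ih, pvRuleStepGet?, pvRuleStepGetD]
    by_cases hc : (r1.1 ≤ v ∧ v ≤ r1.2) ∨ (r2.1 ≤ v ∧ v ≤ r2.2)
    · have hnames : pvNames ((name, r1, r2) :: rules) v = name :: pvNames rules v := by
        have : ((decide (r1.1 ≤ v) && decide (v ≤ r1.2)) || (decide (r2.1 ≤ v) && decide (v ≤ r2.2))) = true := by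
          simpa using hc
        simp [pvNames, this]
      rw [hnames]
      by_cases hrest : pvNames rules v = [] <;>
        simp [hrest, hc, PySem.Set.update_cons, PySem.Set.update_nil]
    · have hnames : pvNames ((name, r1, r2) :: rules) v = pvNames rules v := by
        have : ((decide (r1.1 ≤ v) && decide (v ≤ r1.2)) || (decide (r2.1 ≤ v) && decide (v ≤ r2.2))) = false := by
          simpa using hc
        simp [pvNames, this]
      rw [hnames]
      by_cases hrest : pvNames rules v = [] <;> simp [hrest, hc]

-- A's final lookup (from the empty dict) is exactly B's note for v
theorem pvDictCharEmpty (rules : List (String × (Int × Int) × (Int × Int))) (v : Int) :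
    (rules.foldl pvRuleStep PySem.Dict.empty).get? v = pvNoteFor rules v := by
  rw [pvDictChar]
  by_cases h : pvNames rules v = [] <;>
    simp [h, pvNoteFor, PySem.Set.ofList_eq_foldl, PySem.Set.update]

-- effect of memoising one ticket's values on one lookup
theorem pvMemoTicket (rules : List (String × (Int × Int) × (Int × Int))) (L : List Int)
    (d : PySem.Dict Int (Option (List String)))
    (hd : ∀ w, d.get? w = none ∨ d.get? w = some (pvNoteFor rules w)) (v : Int) :
    (L.foldl (fun d v => if d.contains v then d else d.insert v (pvNoteFor rules v)) d).get? v =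
      if v ∈ L ∨ (d.get? v).isSome then some (pvNoteFor rules v) else none := by
  induction L generalizing d with
  | nil =>
    rcases hd v with h | h <;> simp [h]
  | cons x L ih =>
    simp only [List.foldl_cons]
    by_cases hcx : (d.get? x).isSome
    · have hc : d.contains x = true := by
        rw [PySem.Dict.contains_eq_isSome_get?]; exact hcx
      rw [if_pos hc, ih d hd]
      by_cases hvx : v = x
      · subst hvx; simp [hcx]
      · simp [List.mem_cons, hvx]
    · have hc : d.contains x = false := by
        rw [PySem.Dict.contains_eq_isSome_get?]; simpa using hcx
      rw [hc]
      simp only [Bool.false_eq_true, if_false]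
      have hd' : ∀ w, (d.insert x (pvNoteFor rules x)).get? w = none ∨
          (d.insert x (pvNoteFor rules x)).get? w = some (pvNoteFor rules w) := by
        intro w
        by_cases hwx : w = x
        · subst hwx; right; rw [PySem.Dict.get?_insert_self]
        · rw [PySem.Dict.get?_insert_of_ne _ _ hwx]; exact hd w
      rw [ih _ hd']
      by_cases hvx : v = x
      · subst hvx; simp [PySem.Dict.get?_insert_self]
      · rw [PySem.Dict.get?_insert_of_ne _ _ hvx]
        simp [List.mem_cons, hvx]

-- the memo B builds over all of nearby, looked up at v
theorem pvMemoBuild (rules : List (String × (Int × Int) × (Int × Int))) (T : List (List Int))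
    (d : PySem.Dict Int (Option (List String)))
    (hd : ∀ w, d.get? w = none ∨ d.get? w = some (pvNoteFor rules w)) (v : Int) :
    (T.foldl (fun d t =>
        t.foldl (fun d v => if d.contains v then d else d.insert v (pvNoteFor rules v)) d) d).get? v =
      if (∃ t ∈ T, v ∈ t) ∨ (d.get? v).isSome then some (pvNoteFor rules v) else none := by
  induction T generalizing d with
  | nil =>
    rcases hd v with h | h <;> simp [h]
  | cons t T ih =>
    simp only [List.foldl_cons]
    have hd' : ∀ w, (t.foldl (fun d v => if d.contains v then d else d.insert v (pvNoteFor rules v)) d).get? w = none ∨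
        (t.foldl (fun d v => if d.contains v then d else d.insert v (pvNoteFor rules v)) d).get? w = some (pvNoteFor rules w) := by
      intro w
      rw [pvMemoTicket rules t d hd w]
      by_cases h : w ∈ t ∨ (d.get? w).isSome <;> simp [h]
    rw [ih _ hd']
    have hsome : ((t.foldl (fun d v => if d.contains v then d else d.insert v (pvNoteFor rules v)) d).get? v).isSome =
        ((v ∈ t ∨ (d.get? v).isSome : Prop) : Bool) := by
      rw [pvMemoTicket rules t d hd v]
      by_cases h : v ∈ t ∨ (d.get? v).isSome <;> simp [h]
    rw [hsome]
    by_cases h1 : v ∈ t <;> by_cases h2 : ∃ u ∈ T, v ∈ u <;> by_cases h3 : (d.get? v).isSome <;>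
      simp [h1, h2, h3]

-- ===== VERDICT (by name: the statement is the Claim_ definition above) =====
theorem annotate_nearby_tickets_spec : Claim_equal_annotate_nearby_tickets := by
  intro rules yours nearby _
  show annotate_nearby_tickets rules yours nearby = annotate_nearby_tickets_alt rules yours nearby
  unfold annotate_nearby_tickets annotate_nearby_tickets_alt
  rw [PySem.List.foldl_append_singleton_eq_map]
  refine List.map_congr_left (fun t ht => ?_)
  refine Prod.ext rfl ?_
  refine List.map_congr_left (fun v hv => ?_)
  rw [pvDictCharEmpty]
  rw [pvMemoBuild rules nearby PySem.Dict.empty (fun w => Or.inl (PySem.Dict.get?_empty w)) v]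
  rw [if_pos (Or.inl ⟨t, ht, hv⟩)]
  rfl
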